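-- pv_equiv track=rewrite | github.com/scott-sattler/sudoku-solver | solver_engine.py | _s_rule_check
-- ===== SOURCE A (Python) =====
-- def _s_rule_check(board, i, j) -> bool:
--     """ checks the local 9 square grid for board[i][j] value """
--     # get top left corner of each 3x3 square
--     i_0 = i - (i % 3)
--     j_0 = j - (j % 3)
--     board_val = board[i][j]
--     for k in range(3):
--         for l in range(3):
--             if (i, j) == (k + i_0, l + j_0):
--                 continue
--             sqr_board_val = board[k + i_0][l + j_0]
--             if sqr_board_val == board_val:
--                 return False
--     return True
-- ===== SOURCE B (Python) =====
-- def _s_rule_check(board, i, j) -> bool: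
--     """ checks the local 9 square grid for board[i][j] value """
--     i_0 = i - (i % 3)
--     j_0 = j - (j % 3)
--     v = board[i][j]
--     s = sorted(board[i_0 + k // 3][j_0 + k % 3] for k in range(9))
--     return all(a != v or b != v for a, b in zip(s, s[1:]))
-- ===== Notes on version B (the rewrite author's own statement) =====
-- stated objective: alternative
-- what changed: Replaces the positional skip-and-early-exit scan by sorting the nine block values and testing that no adjacent pair in sorted order both equal the cell's value (sorting makes duplicates adjacent; the cell itself supplies one guaranteed copy).
-- outside the precondition, e.g. on _s_rule_check([[1, 1], [1]], 0, 0): A returns False, B raises IndexError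
import Mathlib
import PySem

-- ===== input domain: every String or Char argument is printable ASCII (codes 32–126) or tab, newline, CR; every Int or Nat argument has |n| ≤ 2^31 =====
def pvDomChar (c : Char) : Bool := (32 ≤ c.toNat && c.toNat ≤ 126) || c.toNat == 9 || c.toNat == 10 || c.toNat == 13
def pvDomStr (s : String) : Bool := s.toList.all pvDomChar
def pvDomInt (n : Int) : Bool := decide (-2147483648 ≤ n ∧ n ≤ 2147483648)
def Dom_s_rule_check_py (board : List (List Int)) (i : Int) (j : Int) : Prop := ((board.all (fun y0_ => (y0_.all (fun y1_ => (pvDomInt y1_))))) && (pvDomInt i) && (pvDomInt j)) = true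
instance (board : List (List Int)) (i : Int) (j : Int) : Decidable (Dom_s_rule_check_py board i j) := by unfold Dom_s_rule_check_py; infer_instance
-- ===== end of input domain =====

-- B replaces A's skip-the-(i,j)-cell short-circuit scan by sorting the nine block values and checking that no adjacent sorted pair both equal the cell's value (different algorithm, same cost).


-- ===== PORT A =====
-- board[k + i_0][l + j_0] (total form; Pre_ guarantees both indices are in range)
def pvVal (board : List (List Int)) (i0 j0 : Int) (p : Int × Int) : Int :=
  PySem.List.pyGetD (PySem.List.pyGetD board (p.1 + i0) []) (p.2 + j0) 0

-- the nested 'for k … for l …' loop with its 'continue' skip and early 'return False'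
def pvALoop (board : List (List Int)) (i j i0 j0 bv : Int) : List (Int × Int) → Bool
  | [] => true
  | p :: rest =>
    if (i, j) = (p.1 + i0, p.2 + j0) then pvALoop board i j i0 j0 bv rest
    else if pvVal board i0 j0 p = bv then false
    else pvALoop board i j i0 j0 bv rest

def s_rule_check_py (board : List (List Int)) (i : Int) (j : Int) : Bool :=
  let i0 := i - PySem.Int.mod i 3
  let j0 := j - PySem.Int.mod j 3
  let bv := PySem.List.pyGetD (PySem.List.pyGetD board i []) j 0
  pvALoop board i j i0 j0 bv
    ((PySem.List.pyRange 0 3 1).flatMap (fun k => (PySem.List.pyRange 0 3 1).map (fun l => (k, l))))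

-- ===== PORT B =====
def s_rule_check_py_alt (board : List (List Int)) (i : Int) (j : Int) : Bool :=
  let i0 := i - PySem.Int.mod i 3
  let j0 := j - PySem.Int.mod j 3
  let v := PySem.List.pyGetD (PySem.List.pyGetD board i []) j 0
  let s := PySem.List.sorted ((PySem.List.pyRange 0 9 1).map
      (fun k => PySem.List.pyGetD (PySem.List.pyGetD board (i0 + PySem.Int.floordiv k 3) [])
        (j0 + PySem.Int.mod k 3) 0)) (fun x => x) false
  (s.zip (PySem.List.slice s (some 1) none)).all
    (fun p => decide (p.1 ≠ v) || decide (p.2 ≠ v))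

-- ===== PRECONDITION & SPEC =====
-- Pre_ requires all nine cells of the 3x3 block to be valid (Python) indices; it excludes
-- the inputs where an access raises IndexError, and thereby also the inputs where A merely
-- short-circuits to False before reaching an out-of-range cell (see cites).
def Pre_s_rule_check_py (board : List (List Int)) (i : Int) (j : Int) : Prop :=
  ∀ k ∈ ([0, 1, 2] : List Int), ∀ l ∈ ([0, 1, 2] : List Int),
    PySem.Raise.InRange board.length (k + (i - PySem.Int.mod i 3)) ∧
    PySem.Raise.InRange (PySem.List.pyGetD board (k + (i - PySem.Int.mod i 3)) []).length
      (l + (j - PySem.Int.mod j 3))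
instance (board : List (List Int)) (i : Int) (j : Int) : Decidable (Pre_s_rule_check_py board i j) := by unfold Pre_s_rule_check_py; infer_instance

def pvWitness_s_rule_check_py : List (List Int) × Int × Int :=
  ([[1, 2, 3], [4, 5, 6], [7, 8, 9]], 0, 0)

def Spec_s_rule_check_py (board : List (List Int)) (i : Int) (j : Int) (out : Bool) : Prop := out = s_rule_check_py_alt board i j
instance (board : List (List Int)) (i : Int) (j : Int) (out : Bool) : Decidable (Spec_s_rule_check_py board i j out) := by unfold Spec_s_rule_check_py; infer_instance

-- ===== CLAIM (what is proved, stated in full; the proofs are below) =====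
def Claim_equal_s_rule_check_py : Prop := ∀ (board : List (List Int)) (i : Int) (j : Int), Dom_s_rule_check_py board i j → Pre_s_rule_check_py board i j → Spec_s_rule_check_py board i j (s_rule_check_py board i j)

-- ===== LEMMAS AND PROOFS =====

-- when no pair of ps is the skipped one, A's loop succeeds iff bv occurs nowhere
lemma pvALoop_zero (board : List (List Int)) (i j i0 j0 bv : Int) (ps : List (Int × Int))
    (h : ps.countP (fun p => decide ((i, j) = (p.1 + i0, p.2 + j0))) = 0) :
    (pvALoop board i j i0 j0 bv ps = true ↔ (ps.map (pvVal board i0 j0)).count bv = 0) := by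
  induction ps with
  | nil => simp [pvALoop]
  | cons p rest ih =>
      rw [List.countP_cons] at h
      by_cases hq : (i, j) = (p.1 + i0, p.2 + j0)
      · simp [hq] at h
      · simp only [hq, decide_false] at h
        by_cases hv : pvVal board i0 j0 p = bv
        · simp [pvALoop, hq, hv]
        · simp [pvALoop, hq, hv, ih (by omega)]

-- when exactly one pair of ps is the skipped one and it carries the value bv,
-- A's loop succeeds iff bv occurs exactly once among all values
lemma pvALoop_one (board : List (List Int)) (i j i0 j0 bv : Int) (ps : List (Int × Int))
    (h : ps.countP (fun p => decide ((i, j) = (p.1 + i0, p.2 + j0))) = 1)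
    (hbv : ∀ p : Int × Int, (i, j) = (p.1 + i0, p.2 + j0) → pvVal board i0 j0 p = bv) :
    (pvALoop board i j i0 j0 bv ps = true ↔ (ps.map (pvVal board i0 j0)).count bv = 1) := by
  induction ps with
  | nil => simp at h
  | cons p rest ih =>
      by_cases hq : (i, j) = (p.1 + i0, p.2 + j0)
      · rw [List.countP_cons, decide_eq_true hq, if_pos rfl] at h
        have h0 : rest.countP (fun p => decide ((i, j) = (p.1 + i0, p.2 + j0))) = 0 := by omega
        rw [List.map_cons, List.count_cons]
        simp [pvALoop, hq, hbv p hq, pvALoop_zero board i j i0 j0 bv rest h0]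
      · rw [List.countP_cons, decide_eq_false hq, if_neg Bool.false_ne_true] at h
        have h1 : rest.countP (fun p => decide ((i, j) = (p.1 + i0, p.2 + j0))) = 1 := by omega
        by_cases hv : pvVal board i0 j0 p = bv
        · obtain ⟨x, hx, hqx⟩ := List.countP_pos_iff.mp (by omega :
            0 < rest.countP (fun p => decide ((i, j) = (p.1 + i0, p.2 + j0))))
          have hmem : bv ∈ rest.map (pvVal board i0 j0) :=
            List.mem_map.mpr ⟨x, hx, hbv x (of_decide_eq_true hqx)⟩
          have hpos := List.count_pos_iff.mpr hmem
          rw [List.map_cons, List.count_cons]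
          simp only [pvALoop, if_neg hq, if_pos hv]
          constructor
          · intro hfalse; exact absurd hfalse (by simp)
          · intro hc; simp [hv] at hc; omega
        · rw [List.map_cons, List.count_cons]
          simp [pvALoop, hq, hv, ih h1]

-- in a ≤-sorted list, no adjacent pair both equal to v  ↔  v occurs at most once
lemma pvAdjCount (v : Int) : ∀ (s : List Int), s.Pairwise (· ≤ ·) →
    (((s.zip s.tail).all (fun p => decide (p.1 ≠ v) || decide (p.2 ≠ v))) = true ↔
      s.count v ≤ 1) := by
  intro s
  induction s with
  | nil => simp
  | cons a t ih =>
      intro hp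
      rw [List.pairwise_cons] at hp
      obtain ⟨hale, hpt⟩ := hp
      cases t with
      | nil => simp [List.count_cons]; split_ifs <;> omega
      | cons b t' =>
          have hzip : ((a :: b :: t').zip (a :: b :: t').tail) =
              (a, b) :: ((b :: t').zip (b :: t').tail) := rfl
          have hcc : (a :: b :: t').count v =
              (b :: t').count v + if a = v then 1 else 0 := by
            simp only [List.count_cons, beq_iff_eq]
          rw [hzip, List.all_cons, Bool.and_eq_true, hcc]
          rcases eq_or_ne a v with hav | hav
          · rw [if_pos hav]
            rcases eq_or_ne b v with hbv | hbv
            · have hc2 : 1 ≤ (b :: t').count v := by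
                simp only [List.count_cons, beq_iff_eq, if_pos hbv]
                omega
              constructor
              · intro hfalse
                rw [hav, hbv] at hfalse
                simp at hfalse
              · intro hc
                omega
            · have hvb : v < b := lt_of_le_of_ne (hav ▸ hale b (by simp)) (Ne.symm hbv)
              have ht0 : (b :: t').count v = 0 := by
                rw [List.count_eq_zero]
                intro hm
                rcases List.mem_cons.mp hm with h | h
                · exact hbv h.symm
                · have := (List.pairwise_cons.mp hpt).1 v h
                  omega
              have hall : (((b :: t').zip (b :: t').tail).all
                  (fun p => decide (p.1 ≠ v) || decide (p.2 ≠ v))) = true :=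
                (ih hpt).mpr (by omega)
              rw [ht0]
              constructor
              · intro _; omega
              · intro _
                exact ⟨by simp [hbv], hall⟩
          · rw [if_neg hav, Nat.add_zero]
            have hg : (decide (a ≠ v) || decide (b ≠ v)) = true := by simp [hav]
            rw [hg]
            constructor
            · intro h
              exact (ih hpt).mp h.2
            · intro h
              exact ⟨rfl, (ih hpt).mpr h⟩

-- ===== VERDICT (by name: the statement is the Claim_ definition above) =====
theorem s_rule_check_py_spec : Claim_equal_s_rule_check_py := by
  intro board i j _ _
  unfold Spec_s_rule_check_py
  set m := PySem.Int.mod i 3 with hm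
  set n := PySem.Int.mod j 3 with hn
  set bv := PySem.List.pyGetD (PySem.List.pyGetD board i []) j 0 with hbvdef
  have hm0 : 0 ≤ m := PySem.Int.mod_nonneg i (by norm_num)
  have hm3 : m < 3 := PySem.Int.mod_lt i (by norm_num)
  have hn0 : 0 ≤ n := PySem.Int.mod_nonneg j (by norm_num)
  have hn3 : n < 3 := PySem.Int.mod_lt j (by norm_num)
  have hcount : ([(0,0),(0,1),(0,2),(1,0),(1,1),(1,2),(2,0),(2,1),(2,2)] : List (Int × Int)).countP
      (fun p => decide ((i, j) = (p.1 + (i - m), p.2 + (j - n)))) = 1 := by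
    rw [List.countP_congr (q := fun p => decide (p = ((m, n) : Int × Int)))
      (by intro p _; simp only [decide_eq_true_eq, Prod.ext_iff]; omega)]
    have h1 : m = 0 ∨ m = 1 ∨ m = 2 := by omega
    have h2 : n = 0 ∨ n = 1 ∨ n = 2 := by omega
    rcases h1 with h1 | h1 | h1 <;> rcases h2 with h2 | h2 | h2 <;> rw [h1, h2] <;> decide
  have hbv : ∀ p : Int × Int, (i, j) = (p.1 + (i - m), p.2 + (j - n)) →
      pvVal board (i - m) (j - n) p = bv := by
    intro p hp
    rw [Prod.mk.injEq] at hp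
    unfold pvVal
    rw [← hp.1, ← hp.2]
  have hA := pvALoop_one board i j (i - m) (j - n) bv _ hcount hbv
  -- B's generator expression enumerates the same nine cell values
  have hr9 : PySem.List.pyRange 0 9 1 = [0, 1, 2, 3, 4, 5, 6, 7, 8] := by decide
  have hblock : (PySem.List.pyRange 0 9 1).map
      (fun k => PySem.List.pyGetD (PySem.List.pyGetD board ((i - m) + PySem.Int.floordiv k 3) [])
        ((j - n) + PySem.Int.mod k 3) 0) =
      ([(0,0),(0,1),(0,2),(1,0),(1,1),(1,2),(2,0),(2,1),(2,2)] : List (Int × Int)).map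
        (pvVal board (i - m) (j - n)) := by
    rw [hr9]
    simp only [List.map_cons, List.map_nil, pvVal,
      show PySem.Int.floordiv 0 3 = 0 from by decide, show PySem.Int.mod 0 3 = 0 from by decide,
      show PySem.Int.floordiv 1 3 = 0 from by decide, show PySem.Int.mod 1 3 = 1 from by decide,
      show PySem.Int.floordiv 2 3 = 0 from by decide, show PySem.Int.mod 2 3 = 2 from by decide,
      show PySem.Int.floordiv 3 3 = 1 from by decide, show PySem.Int.mod 3 3 = 0 from by decide,
      show PySem.Int.floordiv 4 3 = 1 from by decide, show PySem.Int.mod 4 3 = 1 from by decide,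
      show PySem.Int.floordiv 5 3 = 1 from by decide, show PySem.Int.mod 5 3 = 2 from by decide,
      show PySem.Int.floordiv 6 3 = 2 from by decide, show PySem.Int.mod 6 3 = 0 from by decide,
      show PySem.Int.floordiv 7 3 = 2 from by decide, show PySem.Int.mod 7 3 = 1 from by decide,
      show PySem.Int.floordiv 8 3 = 2 from by decide, show PySem.Int.mod 8 3 = 2 from by decide]
    ring_nf
  set blockVals := ([(0,0),(0,1),(0,2),(1,0),(1,1),(1,2),(2,0),(2,1),(2,2)] : List (Int × Int)).map
    (pvVal board (i - m) (j - n)) with hbl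
  -- bv occurs at least once among the nine block values (the cell itself)
  have hmn : (i, j) = (m + (i - m), n + (j - n)) := by rw [Prod.mk.injEq]; omega
  have hmem : bv ∈ blockVals := by
    have hpmem : ((m, n) : Int × Int) ∈
        ([(0,0),(0,1),(0,2),(1,0),(1,1),(1,2),(2,0),(2,1),(2,2)] : List (Int × Int)) := by
      have h1 : m = 0 ∨ m = 1 ∨ m = 2 := by omega
      have h2 : n = 0 ∨ n = 1 ∨ n = 2 := by omega
      rcases h1 with h1 | h1 | h1 <;> rcases h2 with h2 | h2 | h2 <;> rw [h1, h2] <;> decide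
    exact hbl ▸ List.mem_map.mpr ⟨(m, n), hpmem, hbv (m, n) hmn⟩
  have hge1 : 1 ≤ blockVals.count bv := List.count_pos_iff.mpr hmem
  -- the sorted list: a permutation of blockVals, pairwise ≤
  set s := PySem.List.sorted blockVals (fun x => x) false with hs
  have hperm : s.Perm blockVals := PySem.List.sorted_perm blockVals (fun x => x) false
  have hpw : s.Pairwise (· ≤ ·) := by
    simpa using PySem.List.sorted_pairwise blockVals (fun x => x)
  have hB := pvAdjCount bv s hpw
  have hAdef : s_rule_check_py board i j = pvALoop board i j (i - m) (j - n) bv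
      [(0,0),(0,1),(0,2),(1,0),(1,1),(1,2),(2,0),(2,1),(2,2)] := rfl
  have hBdef : s_rule_check_py_alt board i j =
      (s.zip (PySem.List.slice s (some 1) none)).all
        (fun p => decide (p.1 ≠ bv) || decide (p.2 ≠ bv)) := by
    show ((PySem.List.sorted ((PySem.List.pyRange 0 9 1).map
        (fun k => PySem.List.pyGetD (PySem.List.pyGetD board ((i - m) + PySem.Int.floordiv k 3) [])
          ((j - n) + PySem.Int.mod k 3) 0)) (fun x => x) false).zip _).all _ = _
    rw [hblock]
  rw [hAdef, hBdef, PySem.List.slice_from_one, Bool.eq_iff_iff, hA, hB,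
    hperm.count_eq]
  omega
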